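-- pv_equiv track=rewrite | github.com/LevRoz630/hku-avenir-2nd-round | backtester/backtest/position_managers/v1_ls_pm.py | _prioritize_close_orders
-- ===== SOURCE A (Python) =====
-- from typing import List, Dict, Any, Optional
--
-- def _prioritize_close_orders(orders: List[Dict[str, Any]]) -> List[Dict[str, Any]]:
--     by_symbol = {}
--     for o in orders:
--         sym = o.get('symbol')
--         if not sym:
--             continue
--         if o.get('side') == 'CLOSE':
--             by_symbol[sym] = o
--         elif sym not in by_symbol or by_symbol[sym].get('side') != 'CLOSE':
--             by_symbol[sym] = o
--     return list(by_symbol.values())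
-- ===== SOURCE B (Python) =====
-- def _pick(group):
--     closes = [o for o in group if o.get('side') == 'CLOSE']
--     return closes[-1] if closes else group[-1]
--
-- def _prioritize_close_orders(orders):
--     groups = {}
--     for o in orders:
--         sym = o.get('symbol')
--         if sym:
--             groups.setdefault(sym, []).append(o)
--     return [_pick(group) for group in groups.values()]
-- ===== Notes on version B (the rewrite author's own statement) =====
-- stated objective: alternative
-- what changed: Replaces A's inline single-pass 'CLOSE locks in unless another CLOSE arrives' update logic with an explicit group-then-choose decomposition: first group orders by truthy symbol in first-appearance order, then for each group pick the last CLOSE order, or the last order if the group has no CLOSE.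
import Mathlib
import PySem

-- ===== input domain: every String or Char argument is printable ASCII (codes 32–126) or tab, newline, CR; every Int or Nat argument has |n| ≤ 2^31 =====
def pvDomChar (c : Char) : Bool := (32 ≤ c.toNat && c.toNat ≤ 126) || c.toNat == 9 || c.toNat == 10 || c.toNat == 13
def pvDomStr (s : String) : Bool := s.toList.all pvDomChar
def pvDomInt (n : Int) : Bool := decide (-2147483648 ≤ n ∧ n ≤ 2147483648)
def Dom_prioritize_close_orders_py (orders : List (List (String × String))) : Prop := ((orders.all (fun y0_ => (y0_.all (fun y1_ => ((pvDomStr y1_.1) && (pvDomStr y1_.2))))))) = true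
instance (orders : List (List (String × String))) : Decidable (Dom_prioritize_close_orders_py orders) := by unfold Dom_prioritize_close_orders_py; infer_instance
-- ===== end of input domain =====

-- B replaces A's inline single-pass "CLOSE locks in" update with an explicit group-then-choose
-- decomposition (group orders by truthy symbol, then pick last CLOSE else last); same cost, alternative structure.


-- ===== PORT A =====
-- one loop iteration of A: sym = o.get('symbol'); skip falsy; CLOSE overwrites;
-- otherwise overwrite only when the stored order is absent or not CLOSE
def aStep (d : PySem.Dict String (List (String × String))) (o : List (String × String)) :
    PySem.Dict String (List (String × String)) :=
  match (PySem.Dict.mk o).get? "symbol" with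
  | none => d
  | some sym =>
    if sym = "" then d
    else if (PySem.Dict.mk o).get? "side" = some "CLOSE" then d.insert sym o
    else if d.contains sym = false then d.insert sym o
    else if ¬ ((PySem.Dict.mk (d.getD sym [])).get? "side" = some "CLOSE") then d.insert sym o
    else d

def prioritize_close_orders_py (orders : List (List (String × String))) : List (List (String × String)) :=
  (orders.foldl aStep PySem.Dict.empty).values

-- ===== PORT B =====
-- o.get('side') == 'CLOSE'
def isCloseB (o : List (String × String)) : Bool := (PySem.Dict.mk o).get? "side" == some "CLOSE"

-- _pick: last CLOSE order of the group, else the last order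
def pickB (l : List (List (String × String))) : List (String × String) :=
  match (l.filter isCloseB).getLast? with
  | some c => c
  | none => l.getLastD []

-- grouping pass: groups.setdefault(sym, []).append(o) for truthy sym
def bStep (g : PySem.Dict String (List (List (String × String)))) (o : List (String × String)) :
    PySem.Dict String (List (List (String × String))) :=
  match (PySem.Dict.mk o).get? "symbol" with
  | none => g
  | some sym => if sym = "" then g else g.modify sym [] (fun l => l ++ [o])

def prioritize_close_orders_py_alt (orders : List (List (String × String))) : List (List (String × String)) :=
  ((orders.foldl bStep PySem.Dict.empty).items).map (fun p => pickB p.2)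

-- ===== PRECONDITION & SPEC =====
def Spec_prioritize_close_orders_py (orders : List (List (String × String))) (out : List (List (String × String))) : Prop := out = prioritize_close_orders_py_alt orders
instance (orders : List (List (String × String))) (out : List (List (String × String))) : Decidable (Spec_prioritize_close_orders_py orders out) := by unfold Spec_prioritize_close_orders_py; infer_instance

-- ===== CLAIM (what is proved, stated in full; the proofs are below) =====
def Claim_equal_prioritize_close_orders_py : Prop := ∀ (orders : List (List (String × String))), Dom_prioritize_close_orders_py orders → Spec_prioritize_close_orders_py orders (prioritize_close_orders_py orders)

-- ===== LEMMAS AND PROOFS =====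

-- map an entry of the grouping dict to the corresponding entry of A's dict
def phiB (p : String × List (List (String × String))) : String × List (String × String) :=
  (p.1, pickB p.2)

lemma get?_map_phi (L : List (String × List (List (String × String)))) (k : String) :
    (PySem.Dict.mk (L.map phiB)).get? k = ((PySem.Dict.mk L).get? k).map pickB := by
  induction L with
  | nil => rfl
  | cons p rest ih =>
    obtain ⟨s, l⟩ := p
    simp only [List.map_cons, phiB, PySem.Dict.get?_mk_cons]
    by_cases h : (s == k) = true
    · simp [h]
    · simp only [h, Bool.false_eq_true, ↓reduceIte]
      exact ih

lemma pickB_concat (l : List (List (String × String))) (o : List (String × String)) :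
    pickB (l ++ [o]) =
      if isCloseB o then o
      else match (l.filter isCloseB).getLast? with | some c => c | none => o := by
  unfold pickB
  rw [List.filter_append]
  by_cases h : isCloseB o = true
  · simp [h]
  · simp only [h, List.filter_cons, Bool.false_eq_true, ↓reduceIte, List.filter_nil,
      List.append_nil]
    cases hg : (l.filter isCloseB).getLast? with
    | some c => simp
    | none => simp

lemma isCloseB_pickB {l : List (List (String × String))} (hne : l ≠ []) :
    isCloseB (pickB l) = true ↔ l.filter isCloseB ≠ [] := by
  unfold pickB
  cases hg : (l.filter isCloseB).getLast? with
  | some c =>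
    have hc : c ∈ l.filter isCloseB := by
      obtain ⟨l', hl'⟩ := List.getLast?_eq_some_iff.mp hg
      rw [hl']; exact List.mem_concat_self
    have : isCloseB c = true := (List.mem_filter.mp hc).2
    simp only [this, true_iff]
    intro hnil; rw [hnil] at hg; simp at hg
  | none =>
    have hnil : l.filter isCloseB = [] := List.getLast?_eq_none_iff.mp hg
    have hlast : l.getLast?.getD [] = l.getLast hne := by
      rw [List.getLast?_eq_some_getLast hne]; rfl
    have hcl : isCloseB (l.getLast hne) = false := by
      by_contra hb
      exact (List.filter_eq_nil_iff.mp hnil) _ (List.getLast_mem hne) (by simpa using hb)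
    simp [hnil, hlast, hcl]

lemma keys_map_phi (g : PySem.Dict String (List (List (String × String)))) :
    (PySem.Dict.mk (g.items.map phiB)).keys = g.keys := by
  show (g.items.map phiB).map Prod.fst = g.items.map Prod.fst
  rw [List.map_map]; rfl

lemma get?_phi (g : PySem.Dict String (List (List (String × String)))) (k : String) :
    (PySem.Dict.mk (g.items.map phiB)).get? k = (g.get? k).map pickB := by
  have := get?_map_phi g.items k
  simpa using this

lemma contains_phi (g : PySem.Dict String (List (List (String × String)))) (k : String) :
    (PySem.Dict.mk (g.items.map phiB)).contains k = g.contains k := by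
  rw [PySem.Dict.contains_eq_isSome_get?, PySem.Dict.contains_eq_isSome_get?, get?_phi]
  cases g.get? k <;> rfl

lemma mk_phi_insert (g : PySem.Dict String (List (List (String × String)))) (sym : String)
    (L : List (List (String × String))) :
    PySem.Dict.mk ((g.insert sym L).items.map phiB) =
      (PySem.Dict.mk (g.items.map phiB)).insert sym (pickB L) := by
  have key : ((g.insert sym L).items).map phiB =
      ((PySem.Dict.mk (g.items.map phiB)).insert sym (pickB L)).items := by
    rw [PySem.Dict.items_insert, PySem.Dict.items_insert, contains_phi]
    by_cases hc : g.contains sym = true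
    · simp only [hc, ↓reduceIte, List.map_map]
      apply List.map_congr_left
      intro p _
      by_cases hp : (p.1 == sym) = true
      · simp [Function.comp, hp, phiB]
      · simp [Function.comp, hp, phiB]
    · have hc' : g.contains sym = false := by simpa using hc
      simp only [hc', Bool.false_eq_true, ↓reduceIte, List.map_append]
      rfl
  calc PySem.Dict.mk ((g.insert sym L).items.map phiB)
      = PySem.Dict.mk (((PySem.Dict.mk (g.items.map phiB)).insert sym (pickB L)).items) := by
        rw [key]
    _ = _ := rfl

lemma insert_self_of_get? (d : PySem.Dict String (List (String × String))) {k : String}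
    {v : List (String × String)} (hnd : d.keys.Nodup) (h : d.get? k = some v) :
    d.insert k v = d := by
  have hc : d.contains k = true := by rw [PySem.Dict.contains_eq_isSome_get?, h]; rfl
  have hitems := PySem.Dict.items_insert d k v
  rw [if_pos hc] at hitems
  have hmap : d.items.map (fun p => if (p.1 == k) = true then (k, v) else p) = d.items := by
    have : ∀ p ∈ d.items, (fun (p : String × List (String × String)) =>
        if (p.1 == k) = true then (k, v) else p) p = id p := by
      intro p hp
      by_cases hpk : (p.1 == k) = true
      · have hk : p.1 = k := by simpa using hpk
        have hpv : d.get? p.1 = some p.2 := PySem.Dict.get?_of_mem_items d (by simpa using hp) hnd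
        rw [hk, h] at hpv
        have hv : p.2 = v := by simpa using hpv.symm
        simp only [hpk, if_pos, id]
        rw [← hk, ← hv]
      · simp [hpk, id]
    rw [List.map_congr_left this, List.map_id]
  have : (d.insert k v).items = d.items := by rw [hitems, hmap]
  calc d.insert k v = PySem.Dict.mk ((d.insert k v).items) := rfl
    _ = PySem.Dict.mk d.items := by rw [this]
    _ = d := rfl

-- one step of the main invariant
lemma step_phi (g : PySem.Dict String (List (List (String × String)))) (o : List (String × String))
    (hnd : g.keys.Nodup) (hne : ∀ p ∈ g.items, p.2 ≠ []) :
    aStep (PySem.Dict.mk (g.items.map phiB)) o = PySem.Dict.mk ((bStep g o).items.map phiB) := by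
  unfold aStep bStep
  cases hsym : (PySem.Dict.mk o).get? "symbol" with
  | none => rfl
  | some sym =>
    by_cases hemp : sym = ""
    · simp [hemp]
    · simp only [hemp, ↓reduceIte]
      have hmod : g.modify sym [] (fun l => l ++ [o]) = g.insert sym (g.getD sym [] ++ [o]) := rfl
      rw [hmod, mk_phi_insert]
      by_cases hclose : (PySem.Dict.mk o).get? "side" = some "CLOSE"
      · -- o is CLOSE: both insert o
        have hco : isCloseB o = true := by simp [isCloseB, hclose]
        rw [if_pos hclose, pickB_concat, if_pos hco]
      · rw [if_neg hclose]
        have hco : isCloseB o = false := by simp [isCloseB]; intro h; exact absurd h hclose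
        by_cases hc : g.contains sym = true
        · -- sym already grouped
          obtain ⟨l, hl⟩ : ∃ l, g.get? sym = some l := by
            rw [PySem.Dict.contains_eq_isSome_get?] at hc
            exact Option.isSome_iff_exists.mp hc
          have hgD : g.getD sym [] = l := PySem.Dict.getD_of_get?_eq_some g [] hl
          have hcphi : (PySem.Dict.mk (g.items.map phiB)).contains sym = true := by
            rw [contains_phi]; exact hc
          have hstored : (PySem.Dict.mk (g.items.map phiB)).getD sym [] = pickB l := by
            apply PySem.Dict.getD_of_get?_eq_some
            rw [get?_phi, hl]; rfl
          have hlne : l ≠ [] := hne (sym, l) (PySem.Dict.mem_items_of_get?_eq_some g hl)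
          rw [hcphi]
          simp only [Bool.true_eq_false, ↓reduceIte, hstored, hgD]
          by_cases hstc : (PySem.Dict.mk (pickB l)).get? "side" = some "CLOSE"
          · -- stored order is CLOSE: A keeps; pickB (l ++ [o]) = pickB l
            have hfil : l.filter isCloseB ≠ [] := by
              rw [← isCloseB_pickB hlne]; simp [isCloseB, hstc]
            have hpick : pickB (l ++ [o]) = pickB l := by
              rw [pickB_concat, if_neg (by simp [hco])]
              unfold pickB
              cases hg : (l.filter isCloseB).getLast? with
              | some c => simp
              | none => exact absurd (List.getLast?_eq_none_iff.mp hg) hfil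
            rw [if_neg (by simpa using hstc), hpick]
            exact (insert_self_of_get? _ (by rw [keys_map_phi]; exact hnd)
              (by rw [get?_phi, hl]; rfl)).symm
          · -- stored order not CLOSE: A inserts o; pickB (l ++ [o]) = o
            have hfil : l.filter isCloseB = [] := by
              by_contra hb
              exact hstc (by
                have := (isCloseB_pickB hlne).mpr hb
                simpa [isCloseB] using this)
            have hpick : pickB (l ++ [o]) = o := by
              rw [pickB_concat, if_neg (by simp [hco])]
              rw [hfil]
              rfl
            rw [if_pos (by simpa using hstc), hpick]
        · -- new symbol: both append (sym, o)
          have hcphi : (PySem.Dict.mk (g.items.map phiB)).contains sym = false := by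
            rw [contains_phi]; simpa using hc
          have hgD : g.getD sym [] = [] :=
            PySem.Dict.getD_of_not_contains g [] (by simpa using hc)
          rw [hcphi, hgD]
          have hpick : pickB ([] ++ [o]) = o := by
            rw [pickB_concat]; cases isCloseB o <;> simp
          rw [hpick]
          rfl

lemma bStep_nodup (g : PySem.Dict String (List (List (String × String)))) (o : List (String × String))
    (hnd : g.keys.Nodup) : (bStep g o).keys.Nodup := by
  unfold bStep
  cases (PySem.Dict.mk o).get? "symbol" with
  | none => exact hnd
  | some sym =>
    by_cases h : sym = ""
    · simpa [h]
    · simp only [h, ↓reduceIte]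
      exact PySem.Dict.nodup_keys_insert _ _ _ hnd

lemma bStep_nonempty (g : PySem.Dict String (List (List (String × String)))) (o : List (String × String))
    (hne : ∀ p ∈ g.items, p.2 ≠ []) : ∀ p ∈ (bStep g o).items, p.2 ≠ [] := by
  unfold bStep
  cases (PySem.Dict.mk o).get? "symbol" with
  | none => exact hne
  | some sym =>
    by_cases h : sym = ""
    · simp only [h, ↓reduceIte]; exact hne
    · simp only [h, ↓reduceIte]
      intro p hp
      have hmod : g.modify sym [] (fun l => l ++ [o]) = g.insert sym (g.getD sym [] ++ [o]) := rfl
      rw [hmod] at hp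
      rcases (PySem.Dict.mem_items_insert _ _ _ _).mp hp with h1 | h2
      · rw [h1]; simp
      · exact hne p h2.1

lemma fold_inv (orders : List (List (String × String)))
    (g : PySem.Dict String (List (List (String × String))))
    (hnd : g.keys.Nodup) (hne : ∀ p ∈ g.items, p.2 ≠ []) :
    orders.foldl aStep (PySem.Dict.mk (g.items.map phiB)) =
      PySem.Dict.mk ((orders.foldl bStep g).items.map phiB) := by
  induction orders generalizing g with
  | nil => rfl
  | cons o rest ih =>
    simp only [List.foldl_cons]
    rw [step_phi g o hnd hne]
    exact ih (bStep g o) (bStep_nodup g o hnd) (bStep_nonempty g o hne)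

-- ===== VERDICT (by name: the statement is the Claim_ definition above) =====
theorem prioritize_close_orders_py_spec : Claim_equal_prioritize_close_orders_py := by
  intro orders _
  show prioritize_close_orders_py orders = prioritize_close_orders_py_alt orders
  unfold prioritize_close_orders_py prioritize_close_orders_py_alt
  have h0 : (PySem.Dict.empty : PySem.Dict String (List (String × String)))
      = PySem.Dict.mk (((PySem.Dict.empty : PySem.Dict String (List (List (String × String)))).items).map phiB) := rfl
  rw [h0, fold_inv orders PySem.Dict.empty PySem.Dict.nodup_keys_empty (by intro p hp; cases hp)]
  show ((orders.foldl bStep PySem.Dict.empty).items.map phiB).map Prod.snd = _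
  rw [List.map_map]
  rfl
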